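-- pv_equiv track=rewrite | github.com/SobczakUEK/PodstawyProgramowania | 04-Functions/7.19.py | f
-- ===== SOURCE A (Python) =====
-- def f(number):
--     digits = str(number)
--     total = 0
--     for digit in set(digits):
--         count = digits.count(digit)
--         if count > 1:
--             total += int(digit) * count
--     return total
-- ===== SOURCE B (Python) =====
-- def f(number):
--     s = sorted(str(number))
--     total = 0
--     while s:
--         c = s[0]
--         run = 1
--         while run < len(s) and s[run] == c:
--             run += 1
--         if run > 1:
--             total += int(c) * run
--         s = s[run:]
--     return total
-- ===== Notes on version B (the rewrite author's own statement) =====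
-- stated objective: alternative
-- what changed: B sorts the characters of str(number) once and makes a single run-length scan over the sorted list, adding int(c)*run for runs of at least two equal characters, instead of A's per-distinct-character full-string .count() scans.
import Mathlib
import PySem

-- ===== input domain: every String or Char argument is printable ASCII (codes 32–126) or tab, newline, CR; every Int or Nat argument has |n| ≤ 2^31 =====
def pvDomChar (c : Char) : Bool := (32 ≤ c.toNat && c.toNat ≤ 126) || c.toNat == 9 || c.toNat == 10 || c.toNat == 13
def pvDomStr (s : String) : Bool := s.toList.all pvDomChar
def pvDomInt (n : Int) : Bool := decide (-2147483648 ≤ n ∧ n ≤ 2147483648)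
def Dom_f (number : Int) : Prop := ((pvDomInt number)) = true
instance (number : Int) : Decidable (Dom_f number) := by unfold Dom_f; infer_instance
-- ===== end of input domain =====

-- B sorts the characters of str(number) once and does a single run-length scan
-- (instead of A's per-distinct-character full-string .count() scans); same return value.


-- ===== PORT A =====
-- for each d in set(str(number)): count = digits.count(d); if count > 1: total += int(d) * count
-- (the iteration consumes the set only through a sum, which is order-independent;
--  int(d) is ported totally as '(ofChars? [d]).getD 0' — the branch guard count > 1
--  means d is always a decimal digit there, so the getD default is unreachable)
def f (number : Int) : Int :=
  let digits := PySem.Int.toChars number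
  (PySem.Set.ofList digits).foldl
    (fun total d =>
      let count := digits.count d
      if 1 < count then total + (PySem.Int.ofChars? [d]).getD 0 * (count : Int) else total)
    0

-- ===== PORT B =====
-- while s: measure the run of s[0], add int(s[0])*run if run > 1, s = s[run:]
def runScan (s : List Char) : Int :=
  match s with
  | [] => 0
  | c :: rest =>
      let run := (rest.takeWhile (· == c)).length + 1
      (if 1 < run then (PySem.Int.ofChars? [c]).getD 0 * (run : Int) else 0)
        + runScan (rest.dropWhile (· == c))
termination_by s.length
decreasing_by
  simp only [List.length_cons]
  exact Nat.lt_succ_of_le (List.length_dropWhile_le _ _)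

def f_alt (number : Int) : Int :=
  runScan (PySem.List.sorted (PySem.Int.toChars number) (fun c => c))

-- ===== PRECONDITION & SPEC =====
def Spec_f (number : Int) (out : Int) : Prop := out = f_alt number
instance (number : Int) (out : Int) : Decidable (Spec_f number out) := by unfold Spec_f; infer_instance

-- ===== CLAIM (what is proved, stated in full; the proofs are below) =====
def Claim_equal_f : Prop := ∀ (number : Int), Dom_f number → Spec_f number (f number)

-- ===== LEMMAS AND PROOFS =====

-- the contribution of one distinct character d, relative to character list l
def pvTerm (l : List Char) (d : Char) : Int :=
  if 1 < l.count d then (PySem.Int.ofChars? [d]).getD 0 * (l.count d : Int) else 0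

theorem foldl_if_add (S : List Char) (cnt : Char → Nat) (w : Char → Int) (a : Int) :
    S.foldl (fun t d => if 1 < cnt d then t + w d else t) a
      = a + (S.map (fun d => if 1 < cnt d then w d else 0)).sum := by
  have h : (fun (t : Int) d => if 1 < cnt d then t + w d else t)
      = fun t d => t + if 1 < cnt d then w d else 0 := by
    funext t d; split_ifs <;> simp
  rw [h, PySem.List.foldl_add]

theorem A_sum (number : Int) :
    f number = ((PySem.Set.ofList (PySem.Int.toChars number)).map
      (pvTerm (PySem.Int.toChars number))).sum := by
  unfold f pvTerm
  simpa using foldl_if_add (PySem.Set.ofList (PySem.Int.toChars number))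
    (fun d => (PySem.Int.toChars number).count d)
    (fun d => (PySem.Int.ofChars? [d]).getD 0 * ((PySem.Int.toChars number).count d : Int)) 0

-- in a ≤-sorted list, nothing after the leading run of c equals c again
theorem not_mem_dropWhile (c : Char) (rest : List Char)
    (hp : rest.Pairwise (· ≤ ·)) (hge : ∀ x ∈ rest, c ≤ x) :
    c ∉ rest.dropWhile (· == c) := by
  induction rest with
  | nil => simp
  | cons a r ih =>
      rw [List.pairwise_cons] at hp
      by_cases hac : (a == c) = true
      · simp only [List.dropWhile_cons, hac, if_true]
        exact ih hp.2 (fun x hx => hge x (List.mem_cons_of_mem _ hx))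
      · simp only [List.dropWhile_cons, hac]
        intro hmem
        rcases List.mem_cons.mp hmem with h | h
        · exact hac (by simp [h])
        · have h1 : a ≤ c := hp.1 c h
          have h2 : c ≤ a := hge a List.mem_cons_self
          exact hac (by simp [le_antisymm h1 h2])

theorem discard_run (c : Char) : ∀ (t d : List Char), (∀ x ∈ t, x = c) → c ∉ d →
    PySem.Set.discard (PySem.Set.ofList (t ++ d)) c = PySem.Set.ofList d := by
  intro t
  induction t with
  | nil =>
      intro d _ hd
      unfold PySem.Set.discard
      apply List.filter_eq_self.mpr
      intro x hx
      have : x ≠ c := fun h => hd (h ▸ (PySem.Set.mem_ofList d x).mp hx)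
      simp [this]
  | cons a t' ih =>
      intro d ht hd
      have ha : a = c := ht a List.mem_cons_self
      subst ha
      rw [List.cons_append, PySem.Set.ofList_cons]
      unfold PySem.Set.discard
      rw [List.filter_cons_of_neg (by simp), List.filter_filter]
      have : (fun y => !y == a && !y == a) = fun y => !y == a := by
        funext y; cases (y == a) <;> simp
      rw [this]
      exact ih d (fun x hx => ht x (List.mem_cons_of_mem _ hx)) hd

theorem runScan_sorted : ∀ (l : List Char), l.Pairwise (· ≤ ·) →
    runScan l = ((PySem.Set.ofList l).map (pvTerm l)).sum := by
  intro l
  induction l using runScan.induct with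
  | case1 => intro _; simp [runScan]
  | case2 c rest ih =>
      intro hp
      rw [List.pairwise_cons] at hp
      have hge : ∀ x ∈ rest, c ≤ x := hp.1
      set t := rest.takeWhile (· == c) with htdef
      set d := rest.dropWhile (· == c) with hddef
      have hrest : t ++ d = rest := List.takeWhile_append_dropWhile
      have ht : ∀ x ∈ t, x = c := by
        intro x hx
        have := List.mem_takeWhile_imp hx
        simpa using this.symm
      have hd : c ∉ d := not_mem_dropWhile c rest hp.2 hge
      -- count of c in the whole list
      have hct : t.count c = t.length := List.count_eq_length.mpr (fun b hb => by simp [ht b hb])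
      have hcd : d.count c = 0 := List.count_eq_zero.mpr hd
      have hcount_c : (c :: rest).count c = t.length + 1 := by
        rw [← hrest, List.count_cons]
        simp [List.count_append, hct, hcd, Nat.add_comm]
      -- counts of other characters agree with d
      have hcount_ne : ∀ x, x ≠ c → (c :: rest).count x = d.count x := by
        intro x hx
        rw [← hrest, List.count_cons, List.count_append]
        have : t.count x = 0 := List.count_eq_zero.mpr (fun hm => hx (ht x hm))
        simp [this, Ne.symm hx]
      -- the distinct set splits as c :: distinct(d)
      have hset : PySem.Set.ofList (c :: rest) = c :: PySem.Set.ofList d := by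
        rw [PySem.Set.ofList_cons, ← hrest, discard_run c t d ht hd]
      -- the tail is still sorted
      have hdp : d.Pairwise (· ≤ ·) := hp.2.sublist (List.dropWhile_sublist _)
      have hmap : (PySem.Set.ofList d).map (pvTerm (c :: rest))
          = (PySem.Set.ofList d).map (pvTerm d) := by
        apply List.map_congr_left
        intro x hx
        have hxd : x ∈ d := (PySem.Set.mem_ofList d x).mp hx
        have hxc : x ≠ c := fun h => hd (h ▸ hxd)
        unfold pvTerm
        rw [hcount_ne x hxc]
      rw [runScan]
      simp only [← htdef, ← hddef]
      rw [ih hdp, hset, List.map_cons, List.sum_cons, hmap]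
      congr 1
      unfold pvTerm
      rw [hcount_c]

-- ===== VERDICT (by name: the statement is the Claim_ definition above) =====
theorem f_spec : Claim_equal_f := by
  unfold Claim_equal_f Spec_f
  intro number _
  set digits := PySem.Int.toChars number with hdg
  set l := PySem.List.sorted digits (fun c => c) with hl
  have hperm : l.Perm digits := PySem.List.sorted_perm digits _ _
  have hterm : pvTerm l = pvTerm digits := by
    funext x; unfold pvTerm; rw [hperm.count_eq]
  have hsets : (PySem.Set.ofList l).Perm (PySem.Set.ofList digits) := by
    rw [List.perm_ext_iff_of_nodup (PySem.Set.nodup_ofList l) (PySem.Set.nodup_ofList digits)]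
    intro a
    rw [PySem.Set.mem_ofList, PySem.Set.mem_ofList]
    exact hperm.mem_iff
  have hpair : l.Pairwise (· ≤ ·) := by
    have := PySem.List.sorted_pairwise digits (fun c => c)
    simpa using this
  rw [A_sum, f_alt.eq_1, ← hdg, ← hl, runScan_sorted l hpair, hterm]
  exact ((hsets.map (pvTerm digits)).sum_eq).symm
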